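-- pv_equiv track=rewrite | github.com/neo-rs/rsbots | RSCheckerbot/whop_api_probe.py | _extract_member_id_from_manage_url
-- ===== SOURCE A (Python) =====
-- def _extract_member_id_from_manage_url(url: str) -> str:
--     s = str(url or "").strip()
--     if "mber_" not in s:
--         return ""
--     i = s.find("mber_")
--     if i < 0:
--         return ""
--     j = i
--     while j < len(s) and (s[j].isalnum() or s[j] in "_-"):
--         j += 1
--     cand = s[i:j].strip()
--     return cand if cand.startswith("mber_") else ""
-- ===== SOURCE B (Python) =====
-- def _extract_member_id_from_manage_url(url: str) -> str:
--     s = str(url or "").strip()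
--     _, sep, rest = s.partition("mber_")
--     if not sep:
--         return ""
--     token = []
--     for c in rest:
--         if not (c.isalnum() or c in "_-"):
--             break
--         token.append(c)
--     return "mber_" + "".join(token)
-- ===== Notes on version B (the rewrite author's own statement) =====
-- stated objective: simpler
-- what changed: Replaces the contains-check + find + index-based while scan + trailing strip/startswith validation with a single str.partition at 'mber_' followed by a character for-loop with break that collects the token chars, prefixing 'mber_' directly (the strip/startswith steps of A are provably no-ops).
import Mathlib
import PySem

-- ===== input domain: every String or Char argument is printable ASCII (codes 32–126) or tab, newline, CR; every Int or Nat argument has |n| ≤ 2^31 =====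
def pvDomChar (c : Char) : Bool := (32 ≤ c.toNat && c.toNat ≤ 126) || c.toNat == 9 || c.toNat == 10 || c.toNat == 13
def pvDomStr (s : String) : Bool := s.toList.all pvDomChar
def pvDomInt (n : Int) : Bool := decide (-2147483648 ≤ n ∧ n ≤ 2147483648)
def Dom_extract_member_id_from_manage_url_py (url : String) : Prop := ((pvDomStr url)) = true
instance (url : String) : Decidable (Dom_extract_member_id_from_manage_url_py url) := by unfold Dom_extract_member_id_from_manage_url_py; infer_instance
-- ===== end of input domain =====

-- B replaces A's contains-check + find + index-based while scan + no-op strip/startswith steps by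
-- str.partition at "mber_" plus a for-loop over the tail with break collecting token chars (simpler).

-- token-character test: c.isalnum() or c in "_-"  (the same textual condition in both Pythons)
def pvTok (c : Char) : Bool := PySem.Chars.isalnum c || ['_', '-'].contains c

-- ===== PORT A =====
-- the while loop:  j = i;  while j < len(s) and tok(s[j]): j += 1
def pvScanA (s : List Char) (j : Nat) : Nat :=
  if h : j < s.length then
    if pvTok s[j] then pvScanA s (j + 1) else j
  else j
termination_by s.length - j

-- body of A after s = str(url or "").strip(); cand = s[i:j].strip() inlined at its two uses
def pvBodyA (s : List Char) : String :=
  if PySem.Chars.isIn ['m','b','e','r','_'] s = false then "" else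
  if PySem.Chars.find s ['m','b','e','r','_'] < 0 then "" else
  if PySem.Chars.startswith (PySem.Chars.strip (PySem.List.slice s
       (some (PySem.Chars.find s ['m','b','e','r','_']))
       (some ((pvScanA s (PySem.Chars.find s ['m','b','e','r','_']).toNat : Nat) : Int))))
       ['m','b','e','r','_']
  then String.ofList (PySem.Chars.strip (PySem.List.slice s
       (some (PySem.Chars.find s ['m','b','e','r','_']))
       (some ((pvScanA s (PySem.Chars.find s ['m','b','e','r','_']).toNat : Nat) : Int))))
  else ""

def extract_member_id_from_manage_url_py (url : String) : String :=
  pvBodyA (PySem.Chars.strip (if url == "" then "" else url).toList)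

-- ===== PORT B =====
-- body of B after s = str(url or "").strip():
--   _, sep, rest = s.partition("mber_");  if not sep: return ""
--   for c in rest: break unless tok(c); token.append(c)   — the collecting loop is takeWhile
--   return "mber_" + "".join(token)
def pvBodyB (s : List Char) : String :=
  if PySem.Chars.find s ['m','b','e','r','_'] = -1 then ""
  else String.ofList (['m','b','e','r','_'] ++
         (s.drop ((PySem.Chars.find s ['m','b','e','r','_']).toNat + 5)).takeWhile pvTok)

def extract_member_id_from_manage_url_py_alt (url : String) : String :=
  pvBodyB (PySem.Chars.strip (if url == "" then "" else url).toList)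

-- ===== PRECONDITION & SPEC =====
def Spec_extract_member_id_from_manage_url_py (url : String) (out : String) : Prop := out = extract_member_id_from_manage_url_py_alt url
instance (url : String) (out : String) : Decidable (Spec_extract_member_id_from_manage_url_py url out) := by unfold Spec_extract_member_id_from_manage_url_py; infer_instance

-- ===== CLAIM (what is proved, stated in full; the proofs are below) =====
def Claim_equal_extract_member_id_from_manage_url_py : Prop := ∀ (url : String), Dom_extract_member_id_from_manage_url_py url → Spec_extract_member_id_from_manage_url_py url (extract_member_id_from_manage_url_py url)

-- ===== LEMMAS AND PROOFS =====

-- token characters are never whitespace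
theorem pvTok_not_space (c : Char) (h : pvTok c = true) : PySem.Chars.isspace c = false := by
  simp only [pvTok, PySem.Chars.isalnum, PySem.Chars.isalpha, PySem.Chars.isdigit,
        PySem.Chars.isupper, PySem.Chars.islower, Char.le_def, UInt32.le_iff_toNat_le,
        Bool.or_eq_true, Bool.and_eq_true, decide_eq_true_eq, List.contains_eq_mem,
        List.mem_cons, List.not_mem_nil, or_false,
        show ('A').val.toNat = 65 from rfl, show ('Z').val.toNat = 90 from rfl,
        show ('a').val.toNat = 97 from rfl, show ('z').val.toNat = 122 from rfl,
        show ('0').val.toNat = 48 from rfl, show ('9').val.toNat = 57 from rfl] at h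
  have hv : c.val.toNat = c.toNat := rfl
  simp only [PySem.Chars.isspace, Bool.or_eq_false_iff, Bool.and_eq_false_iff]
  rcases h with ((h | h) | h) | (h | h)
  all_goals first
    | (subst h; decide)
    | (rw [hv] at h; simp only [decide_eq_false_iff_not, decide_eq_false_iff_not]; omega)

theorem strip_eq_self_of_no_space (l : List Char)
    (h : ∀ c ∈ l, PySem.Chars.isspace c = false) : PySem.Chars.strip l = l := by
  have h1 : List.dropWhile PySem.Chars.isspace l = l := by
    rw [List.dropWhile_eq_self_iff]
    intro hl
    simp [h l[0] (List.getElem_mem hl)]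
  have h2 : List.dropWhile PySem.Chars.isspace l.reverse = l.reverse := by
    rw [List.dropWhile_eq_self_iff]
    intro hl hsp
    rw [h _ (List.mem_reverse.mp (List.getElem_mem hl))] at hsp
    exact absurd hsp (by decide)
  simp [PySem.Chars.strip, PySem.Chars.lstrip, PySem.Chars.rstrip, h1, h2]

-- characterisation of A's while loop
theorem pvScanA_eq (s : List Char) (j : Nat) :
    pvScanA s j = j + ((s.drop j).takeWhile pvTok).length := by
  fun_induction pvScanA s j with
  | case1 j h htok ih =>
    rw [ih, List.drop_eq_getElem_cons h, List.takeWhile_cons, if_pos htok]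
    simp; omega
  | case2 j h htok =>
    rw [List.drop_eq_getElem_cons h, List.takeWhile_cons, if_neg htok]
    simp
  | case3 j h =>
    rw [List.drop_eq_nil_of_le (by omega)]
    simp

-- the two bodies agree on every stripped string
theorem pvBody_eq (s : List Char) : pvBodyA s = pvBodyB s := by
  by_cases hin : PySem.Chars.isIn ['m','b','e','r','_'] s = true
  · -- occurrence exists: find ≥ 0
    have hinf : ['m','b','e','r','_'] <:+: s := (PySem.Chars.isIn_iff_infix _ s).mp hin
    have hge : 0 ≤ PySem.Chars.find s ['m','b','e','r','_'] := by
      have h1 := PySem.Chars.neg_one_le_find (s := s) (sub := ['m','b','e','r','_'])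
      have h2 : PySem.Chars.find s ['m','b','e','r','_'] ≠ -1 := by
        rw [Ne, PySem.Chars.find_eq_neg_one_iff]; exact fun h => h hinf
      omega
    obtain ⟨k, hfk⟩ : ∃ k : Nat, PySem.Chars.find s ['m','b','e','r','_'] = (k : Int) :=
      ⟨_, (Int.toNat_of_nonneg hge).symm⟩
    obtain ⟨hpre, -⟩ := PySem.Chars.find_spec (s := s) (sub := ['m','b','e','r','_']) hge
    rw [hfk] at hpre
    simp only [Int.toNat_natCast] at hpre
    obtain ⟨t, ht⟩ := hpre
    have hrest : s.drop (k + 5) = t := by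
      have h5 : (s.drop k).drop 5 = t := by rw [← ht]; simp
      rwa [List.drop_drop] at h5
    have hscan : pvScanA s k = k + (5 + (t.takeWhile pvTok).length) := by
      rw [pvScanA_eq, ← ht]
      have htw : (['m','b','e','r','_'] ++ t).takeWhile pvTok
          = ['m','b','e','r','_'] ++ t.takeWhile pvTok := by
        simp [show pvTok 'm' = true from rfl,
              show pvTok 'b' = true from rfl, show pvTok 'e' = true from rfl,
              show pvTok 'r' = true from rfl, show pvTok '_' = true from rfl]
      rw [htw]; simp; omega
    have hslice : PySem.List.slice s (some (k : Int)) (some ((pvScanA s k : Nat) : Int))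
        = ['m','b','e','r','_'] ++ t.takeWhile pvTok := by
      rw [PySem.List.slice_natCast, hscan]
      have hlen : k + (5 + (t.takeWhile pvTok).length) - k
          = (['m','b','e','r','_'] : List Char).length + (t.takeWhile pvTok).length := by
        simp
      rw [hlen, ← ht, List.take_length_add_append]
      congr 1
      exact (List.prefix_iff_eq_take.mp (List.takeWhile_prefix pvTok)).symm
    have htokall : ∀ c ∈ ['m','b','e','r','_'] ++ t.takeWhile pvTok,
        PySem.Chars.isspace c = false := by
      intro c hc
      rcases List.mem_append.mp hc with hc | hc
      · fin_cases hc <;> decide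
      · exact pvTok_not_space c (List.mem_takeWhile_imp hc)
    have hstrip := strip_eq_self_of_no_space _ htokall
    have hstart : PySem.Chars.startswith (['m','b','e','r','_'] ++ t.takeWhile pvTok)
        ['m','b','e','r','_'] = true :=
      (PySem.Chars.startswith_iff _ _).mpr ⟨_, rfl⟩
    unfold pvBodyA pvBodyB
    rw [hfk]
    simp only [Int.toNat_natCast]
    rw [if_neg (show ¬(PySem.Chars.isIn ['m','b','e','r','_'] s = false) by simp [hin]),
        if_neg (show ¬((k : Int) < 0) by omega),
        hslice, hstrip, if_pos hstart, hrest,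
        if_neg (show ¬((k : Int) = -1) by omega)]
  · -- no occurrence: both return ""
    have hin' : PySem.Chars.isIn ['m','b','e','r','_'] s = false := by
      cases h : PySem.Chars.isIn ['m','b','e','r','_'] s
      · rfl
      · exact absurd h hin
    have hfind : PySem.Chars.find s ['m','b','e','r','_'] = -1 :=
      (PySem.Chars.find_eq_neg_one_iff s _).mpr
        (fun h => by simp [(PySem.Chars.isIn_iff_infix _ s).mpr h] at hin')
    unfold pvBodyA pvBodyB
    rw [if_pos hin', if_pos hfind]

-- ===== VERDICT (by name: the statement is the Claim_ definition above) =====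
theorem extract_member_id_from_manage_url_py_spec : Claim_equal_extract_member_id_from_manage_url_py := by
  intro url _
  unfold Spec_extract_member_id_from_manage_url_py
  unfold extract_member_id_from_manage_url_py extract_member_id_from_manage_url_py_alt
  exact pvBody_eq _
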